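-- pv_equiv track=rewrite | github.com/ChavezAILabs/CAIL-rh-investigation | scripts/phase50_beta_scan.py | cd_mul
-- ===== SOURCE A (Python) =====
-- def cd_conj(v):
--     c = list(v)
--     for i in range(1, len(v)): c[i] = -v[i]
--     return c
--
-- def cd_mul(a, b):
--     n = len(a)
--     if n == 1: return [a[0] * b[0]]
--     h = n // 2
--     a1, a2, b1, b2 = a[:h], a[h:], b[:h], b[h:]
--     c1 = [x - y for x, y in zip(cd_mul(a1, b1), cd_mul(cd_conj(b2), a2))]
--     c2 = [x + y for x, y in zip(cd_mul(b2, a1), cd_mul(a2, cd_conj(b1)))]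
--     return c1 + c2
-- ===== SOURCE B (Python) =====
-- def _cd_double(s):
--     # Given the m x m sign table of the half algebra, build the 2m x 2m table:
--     # e_i * e_j = s[i][j] * e_(i^j), with signs matching A's Cayley-Dickson convention.
--     m = len(s)
--     top = [s[i] + [s[j][i] for j in range(m)] for i in range(m)]
--     bot = [[(1 if j == 0 else -1) * s[i][j] for j in range(m)]
--            + [-(1 if j == 0 else -1) * s[j][i] for j in range(m)] for i in range(m)]
--     return top + bot
--
-- def cd_mul(a, b):
--     n = len(a)
--     s = [[1]]
--     while len(s) < n:
--         s = _cd_double(s)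
--     return [sum(s[i][i ^ r] * a[i] * b[i ^ r] for i in range(n)) for r in range(n)]
-- ===== Notes on version B (the rewrite author's own statement) =====
-- stated objective: faster
-- what changed: Replaces the operand-splitting Cayley-Dickson recursion by the algebra's structure constants: a sign table with e_i*e_j = s[i][j]*e_(i xor j) is built once by table doubling, and each output component r is a single flat sum of s[i][i^r]*a[i]*b[i^r].
-- outside the precondition, e.g. on cd_mul([1, 2, 3, 4], [1, 2, 3]): A returns [-12, 14], B raises IndexError; on cd_mul([1, 2], [5]): A raises RecursionError, B raises IndexError
import Mathlib
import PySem

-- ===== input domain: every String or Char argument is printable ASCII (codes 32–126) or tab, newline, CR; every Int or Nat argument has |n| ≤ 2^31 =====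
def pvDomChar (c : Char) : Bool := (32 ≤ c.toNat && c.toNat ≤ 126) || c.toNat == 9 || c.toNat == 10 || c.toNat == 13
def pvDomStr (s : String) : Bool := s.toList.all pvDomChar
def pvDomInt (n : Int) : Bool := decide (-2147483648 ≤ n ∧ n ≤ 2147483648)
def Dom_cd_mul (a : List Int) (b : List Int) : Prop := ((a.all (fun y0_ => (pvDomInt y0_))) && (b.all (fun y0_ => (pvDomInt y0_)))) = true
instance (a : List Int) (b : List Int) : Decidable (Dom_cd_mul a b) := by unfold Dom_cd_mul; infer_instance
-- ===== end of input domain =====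

-- ===== PORT A =====
-- B changes: the operand-splitting Cayley-Dickson recursion is replaced by a structure-constant
-- sign table built once by doubling plus a flat per-component sum (measurably faster in Python).

-- port of cd_conj: c = list(v); c[i] = -v[i] for i in 1..len(v)-1  (head kept, tail negated)
def cdConj (v : List Int) : List Int :=
  match v with
  | [] => []
  | x :: xs => x :: xs.map (fun y => -y)

-- port of cd_mul's recursion. The fuel argument only makes the recursion total in Lean:
-- on every input admitted by Pre_cd_mul the fuel is never exhausted (the recursion depth is
-- log2 n + 1 <= fuel). Where Python raises (b empty at n == 1: IndexError; n == 0: infinite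
-- recursion / RecursionError) the input is excluded by Pre_cd_mul.
def cdMulFuel : Nat → List Int → List Int → List Int
  | 0, _, _ => []
  | fuel+1, a, b =>
    let n := a.length
    if n = 1 then [a.getD 0 0 * b.getD 0 0]
    else
      let h := n / 2
      let c1 := List.zipWith (fun x y => x - y)
                  (cdMulFuel fuel (a.take h) (b.take h))
                  (cdMulFuel fuel (cdConj (b.drop h)) (a.drop h))
      let c2 := List.zipWith (fun x y => x + y)
                  (cdMulFuel fuel (b.drop h) (a.take h))
                  (cdMulFuel fuel (a.drop h) (cdConj (b.take h)))
      c1 ++ c2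

def cd_mul (a : List Int) (b : List Int) : List Int := cdMulFuel (a.length + 1) a b

-- ===== PORT B =====
-- port of _cd_double: from the m x m sign table of the half algebra build the 2m x 2m table
def cdDouble (s : List (List Int)) : List (List Int) :=
  let m := s.length
  let top := (List.range m).map (fun i =>
    s.getD i [] ++ (List.range m).map (fun j => (s.getD j []).getD i 0))
  let bot := (List.range m).map (fun i =>
    (List.range m).map (fun j => (if j = 0 then (1 : Int) else -1) * (s.getD i []).getD j 0)
    ++ (List.range m).map (fun j => -((if j = 0 then (1 : Int) else -1) * (s.getD j []).getD i 0)))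
  top ++ bot

-- port of the `while len(s) < n: s = _cd_double(s)` loop; the fuel (= n at the call site) only
-- makes the loop total in Lean and is never exhausted (the table length doubles each step)
def cdBuild : Nat → Nat → List (List Int) → List (List Int)
  | 0, _, s => s
  | fuel+1, n, s => if s.length < n then cdBuild fuel n (cdDouble s) else s

def cd_mul_alt (a : List Int) (b : List Int) : List Int :=
  let n := a.length
  let s := cdBuild n n [[1]]
  (List.range n).map (fun r =>
    ((List.range n).map (fun i =>
      (s.getD i []).getD (i ^^^ r) 0 * a.getD i 0 * b.getD (i ^^^ r) 0)).sum)

-- ===== PRECONDITION & SPEC =====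
-- Pre_ admits exactly the inputs on which Python A returns normally: two vectors of the same
-- power-of-two length (the intended Cayley-Dickson domain), plus len(a) = 1 with b nonempty
-- (A reads only b[0] there, and so does B). Everywhere else A raises (RecursionError on n = 0
-- or on the empty sub-vectors its halving produces from mismatched lengths, IndexError on
-- empty b) -- except for some accidental zip-truncated values on mismatched lengths
-- (e.g. a of length 4 with b of length 3), where B raises IndexError, so they are excluded.
def Pre_cd_mul (a : List Int) (b : List Int) : Prop :=
  (a.length = 1 ∧ 1 ≤ b.length) ∨ (a.length = b.length ∧ a.length = 2 ^ (a.length.log2))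

instance (a : List Int) (b : List Int) : Decidable (Pre_cd_mul a b) := by
  unfold Pre_cd_mul; infer_instance

def pvWitness_cd_mul : List Int × List Int := ([1, 2, 3, 4], [5, -6, 7, 8])

def Spec_cd_mul (a : List Int) (b : List Int) (out : List Int) : Prop := out = cd_mul_alt a b
instance (a : List Int) (b : List Int) (out : List Int) : Decidable (Spec_cd_mul a b out) := by
  unfold Spec_cd_mul; infer_instance

-- ===== CLAIM (what is proved, stated in full; the proofs are below) =====
def Claim_equal_cd_mul : Prop := ∀ (a : List Int) (b : List Int),
  Dom_cd_mul a b → Pre_cd_mul a b → Spec_cd_mul a b (cd_mul a b)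

-- ===== LEMMAS AND PROOFS =====

-- the structure constants: e_i * e_j = signF k i j * e_(i ^^^ j) in the 2^k-dimensional algebra,
-- with A's convention (P1 = a1*b1, P2 = conj(b2)*a2 subtracted, P3 = b2*a1, P4 = a2*conj(b1) added)
def signF : Nat → Nat → Nat → Int
  | 0, _, _ => 1
  | k+1, i, j =>
    if i < 2^k then
      (if j < 2^k then signF k i j else signF k (j - 2^k) i)
    else
      (if j < 2^k then (if j = 0 then 1 else -1) * signF k (i - 2^k) j
       else -((if j - 2^k = 0 then 1 else -1) * signF k (j - 2^k) (i - 2^k)))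

-- component r of the product of a and b in the 2^k-dimensional algebra
def eSum (k : Nat) (a b : List Int) (r : Nat) : Int :=
  ∑ i ∈ Finset.range (2^k), signF k i (i ^^^ r) * a.getD i 0 * b.getD (i ^^^ r) 0

-- ---- small list/bitwise helpers ----
theorem getD_take (l : List Int) (n i : Nat) (h : i < n) :
    (l.take n).getD i 0 = l.getD i 0 := by
  simp [List.getD_eq_getElem?_getD, h]

theorem getD_drop (l : List Int) (n i : Nat) :
    (l.drop n).getD i 0 = l.getD (n + i) 0 := by
  simp [List.getD_eq_getElem?_getD, List.getElem?_drop]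

theorem xor_two_pow_add (n t : Nat) (ht : t < 2 ^ n) : 2 ^ n ^^^ t = 2 ^ n + t := by
  apply Nat.eq_of_testBit_eq
  intro i
  rcases lt_trichotomy i n with h | h | h
  · have h1 : (2 ^ n).testBit i = false := by
      simp [Nat.testBit_two_pow]; omega
    rw [Nat.testBit_two_pow_add_gt h t, Nat.testBit_xor, h1]
    simp
  · subst h
    have h1 : t.testBit i = false := Nat.testBit_eq_false_of_lt ht
    rw [Nat.testBit_two_pow_add_eq, Nat.testBit_xor, Nat.testBit_two_pow, h1]
    simp
  · have hpow : 2 ^ (n + 1) ≤ 2 ^ i := Nat.pow_le_pow_right (by omega) (by omega)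
    have h1 : (2 ^ n + t).testBit i = false := by
      apply Nat.testBit_eq_false_of_lt
      have : (2:Nat) ^ (n+1) = 2 ^ n + 2 ^ n := by ring
      omega
    have h2 : (2 ^ n).testBit i = false := by
      simp [Nat.testBit_two_pow]; omega
    have h3 : t.testBit i = false := by
      apply Nat.testBit_eq_false_of_lt
      have := Nat.pow_lt_pow_right (a := 2) (by omega) h
      omega
    rw [h1, Nat.testBit_xor, h2, h3]; rfl

theorem add_xor_of_lt (n t r : Nat) (ht : t < 2 ^ n) (hr : r < 2 ^ n) :
    (2 ^ n + t) ^^^ r = 2 ^ n + (t ^^^ r) := by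
  rw [← xor_two_pow_add n t ht, Nat.xor_assoc,
    xor_two_pow_add n (t ^^^ r) (Nat.xor_lt_two_pow ht hr)]

theorem add_xor_add (n t r : Nat) (ht : t < 2 ^ n) (hr : r < 2 ^ n) :
    (2 ^ n + t) ^^^ (2 ^ n + r) = t ^^^ r := by
  rw [← xor_two_pow_add n t ht, ← xor_two_pow_add n r hr]
  apply Nat.eq_of_testBit_eq
  intro i
  simp [Nat.testBit_xor]
  cases (2 ^ n).testBit i <;> cases t.testBit i <;> cases r.testBit i <;> rfl

theorem sum_reindex_xor (k r : Nat) (hr : r < 2 ^ k) (f : Nat → Int) :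
    ∑ t ∈ Finset.range (2 ^ k), f t = ∑ t ∈ Finset.range (2 ^ k), f (t ^^^ r) := by
  apply Finset.sum_nbij' (i := fun t => t ^^^ r) (j := fun t => t ^^^ r)
  · intro t ht
    simp only [Finset.mem_range] at *
    exact Nat.xor_lt_two_pow ht hr
  · intro t ht
    simp only [Finset.mem_range] at *
    exact Nat.xor_lt_two_pow ht hr
  · intro t _; exact Nat.xor_xor_cancel_right t r
  · intro t _; exact Nat.xor_xor_cancel_right t r
  · intro t _; rw [Nat.xor_xor_cancel_right]

theorem cdConj_length (v : List Int) : (cdConj v).length = v.length := by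
  cases v <;> simp [cdConj]

theorem cdConj_getD (v : List Int) (s : Nat) :
    (cdConj v).getD s 0 = (if s = 0 then 1 else -1) * v.getD s 0 := by
  cases v with
  | nil => cases s <;> simp [cdConj]
  | cons x xs =>
    cases s with
    | zero => simp [cdConj]
    | succ s =>
      simp [cdConj, List.getD_eq_getElem?_getD]
      cases xs[s]? <;> simp

-- ---- the two halving identities for eSum ----
theorem eSum_lo (k : Nat) (a b : List Int) (r : Nat)
    (_ha : a.length = 2 ^ (k+1)) (_hb : b.length = 2 ^ (k+1)) (hr : r < 2 ^ k) :
    eSum (k+1) a b r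
      = eSum k (a.take (2^k)) (b.take (2^k)) r
        - eSum k (cdConj (b.drop (2^k))) (a.drop (2^k)) r := by
  have hsplit : (2:Nat) ^ (k+1) = 2 ^ k + 2 ^ k := by ring
  have h1 : ∑ i ∈ Finset.range (2 ^ k),
      signF (k+1) i (i ^^^ r) * a.getD i 0 * b.getD (i ^^^ r) 0
      = eSum k (a.take (2 ^ k)) (b.take (2 ^ k)) r := by
    apply Finset.sum_congr rfl
    intro i hi
    rw [Finset.mem_range] at hi
    have hx : i ^^^ r < 2 ^ k := Nat.xor_lt_two_pow hi hr
    rw [getD_take a _ i hi, getD_take b _ _ hx]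
    simp [signF, hi, hx]
  have h2 : ∑ t ∈ Finset.range (2 ^ k),
      signF (k+1) (2 ^ k + t) ((2 ^ k + t) ^^^ r) * a.getD (2 ^ k + t) 0
        * b.getD ((2 ^ k + t) ^^^ r) 0
      = - eSum k (cdConj (b.drop (2 ^ k))) (a.drop (2 ^ k)) r := by
    conv_rhs => rw [eSum, sum_reindex_xor k r hr]
    rw [← Finset.sum_neg_distrib]
    apply Finset.sum_congr rfl
    intro t ht
    rw [Finset.mem_range] at ht
    have hs : t ^^^ r < 2 ^ k := Nat.xor_lt_two_pow ht hr
    rw [add_xor_of_lt k t r ht hr]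
    have hi : ¬ (2 ^ k + t < 2 ^ k) := by omega
    have hj : ¬ (2 ^ k + (t ^^^ r) < 2 ^ k) := by omega
    rw [Nat.xor_xor_cancel_right, cdConj_getD]
    rw [← getD_drop a (2 ^ k) t, ← getD_drop b (2 ^ k) (t ^^^ r)]
    simp only [signF, hi, hj, if_false, Nat.add_sub_cancel_left]
    ring
  rw [eSum, hsplit, Finset.sum_range_add, h1, h2]
  ring

theorem eSum_hi (k : Nat) (a b : List Int) (r : Nat)
    (_ha : a.length = 2 ^ (k+1)) (_hb : b.length = 2 ^ (k+1)) (hr : r < 2 ^ k) :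
    eSum (k+1) a b (2^k + r)
      = eSum k (b.drop (2^k)) (a.take (2^k)) r
        + eSum k (a.drop (2^k)) (cdConj (b.take (2^k))) r := by
  have hsplit : (2:Nat) ^ (k+1) = 2 ^ k + 2 ^ k := by ring
  have h1 : ∑ i ∈ Finset.range (2 ^ k),
      signF (k+1) i (i ^^^ (2 ^ k + r)) * a.getD i 0 * b.getD (i ^^^ (2 ^ k + r)) 0
      = eSum k (b.drop (2 ^ k)) (a.take (2 ^ k)) r := by
    conv_rhs => rw [eSum, sum_reindex_xor k r hr]
    apply Finset.sum_congr rfl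
    intro i hi
    rw [Finset.mem_range] at hi
    have hx : i ^^^ r < 2 ^ k := Nat.xor_lt_two_pow hi hr
    have hxc : i ^^^ (2 ^ k + r) = 2 ^ k + (i ^^^ r) := by
      rw [Nat.xor_comm i (2 ^ k + r), add_xor_of_lt k r i hr hi, Nat.xor_comm r i]
    rw [hxc, Nat.xor_xor_cancel_right]
    have hj : ¬ (2 ^ k + (i ^^^ r) < 2 ^ k) := by omega
    rw [← getD_drop b (2 ^ k) (i ^^^ r), getD_take a _ i hi]
    simp only [signF, hi, if_true, hj, if_false, Nat.add_sub_cancel_left]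
    ring
  have h2 : ∑ t ∈ Finset.range (2 ^ k),
      signF (k+1) (2 ^ k + t) ((2 ^ k + t) ^^^ (2 ^ k + r)) * a.getD (2 ^ k + t) 0
        * b.getD ((2 ^ k + t) ^^^ (2 ^ k + r)) 0
      = eSum k (a.drop (2 ^ k)) (cdConj (b.take (2 ^ k))) r := by
    apply Finset.sum_congr rfl
    intro t ht
    rw [Finset.mem_range] at ht
    have hs : t ^^^ r < 2 ^ k := Nat.xor_lt_two_pow ht hr
    rw [add_xor_add k t r ht hr]
    have hi : ¬ (2 ^ k + t < 2 ^ k) := by omega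
    rw [cdConj_getD, ← getD_drop a (2 ^ k) t, getD_take b _ _ hs]
    simp only [signF, hi, if_false, hs, if_true, Nat.add_sub_cancel_left]
    ring
  rw [eSum, hsplit, Finset.sum_range_add, h1, h2]

theorem zipWith_map_same {α : Type} (f : Int → Int → Int) (g h : α → Int) (l : List α) :
    List.zipWith f (l.map g) (l.map h) = l.map (fun x => f (g x) (h x)) := by
  induction l with
  | nil => rfl
  | cons x xs ih => simp [ih]

-- ---- A's recursion computes eSum ----
theorem cdMulFuel_eq (k : Nat) : ∀ (fuel : Nat) (a b : List Int),
    a.length = 2 ^ k → b.length = 2 ^ k → k < fuel →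
    cdMulFuel fuel a b = (List.range (2 ^ k)).map (eSum k a b) := by
  induction k with
  | zero =>
    intro fuel a b ha hb hf
    cases fuel with
    | zero => omega
    | succ f =>
      obtain ⟨x, rfl⟩ := List.length_eq_one_iff.mp ha
      simp [cdMulFuel, eSum, signF]
  | succ k ih =>
    intro fuel a b ha hb hf
    cases fuel with
    | zero => omega
    | succ f =>
      have h2le : (2:Nat) ≤ 2 ^ (k+1) := by
        have := Nat.one_le_two_pow (n := k)
        rw [pow_succ]; omega
      have hlen1 : ¬ (a.length = 1) := by omega
      have hh : a.length / 2 = 2 ^ k := by rw [ha, pow_succ]; omega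
      have hle : (2:Nat) ^ k ≤ 2 ^ (k+1) := by rw [pow_succ]; omega
      have hta : (a.take (a.length / 2)).length = 2 ^ k := by
        rw [List.length_take, hh, ha]; omega
      have htb : (b.take (a.length / 2)).length = 2 ^ k := by
        rw [List.length_take, hh, hb]; omega
      have hda : (a.drop (a.length / 2)).length = 2 ^ k := by
        rw [List.length_drop, hh, ha, pow_succ]; omega
      have hdb : (b.drop (a.length / 2)).length = 2 ^ k := by
        rw [List.length_drop, hh, hb, pow_succ]; omega
      have hkf : k < f := by omega
      rw [cdMulFuel]
      simp only [if_neg hlen1]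
      rw [ih f _ _ hta htb hkf,
        ih f _ _ ((cdConj_length _).trans hdb) hda hkf,
        ih f _ _ hdb hta hkf,
        ih f _ _ hda ((cdConj_length _).trans htb) hkf,
        zipWith_map_same, zipWith_map_same]
      rw [show (2:Nat) ^ (k+1) = 2 ^ k + 2 ^ k from by ring, List.range_add,
        List.map_append, List.map_map]
      congr 1
      · apply List.map_congr_left
        intro r hrm
        rw [List.mem_range] at hrm
        rw [hh, eSum_lo k a b r ha hb hrm]
      · apply List.map_congr_left
        intro r hrm
        rw [List.mem_range] at hrm
        simp only [Function.comp]
        rw [hh, eSum_hi k a b r ha hb hrm]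

-- ---- B's table is the structure-constant table ----
def TabOK (k : Nat) (s : List (List Int)) : Prop :=
  s.length = 2 ^ k ∧
  (∀ i, i < 2 ^ k → (s.getD i []).length = 2 ^ k) ∧
  (∀ i, i < 2 ^ k → ∀ j, j < 2 ^ k → (s.getD i []).getD j 0 = signF k i j)

theorem tabOK_zero : TabOK 0 [[1]] := by
  refine ⟨rfl, ?_, ?_⟩ <;> intro i hi <;> interval_cases i <;> simp [signF]

theorem getD_append_lt {α : Type} (d : α) (l1 l2 : List α) (i : Nat) (h : i < l1.length) :
    (l1 ++ l2).getD i d = l1.getD i d := by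
  simp [List.getD_eq_getElem?_getD, List.getElem?_append_left h]

theorem getD_append_ge {α : Type} (d : α) (l1 l2 : List α) (i : Nat) (h : l1.length ≤ i) :
    (l1 ++ l2).getD i d = l2.getD (i - l1.length) d := by
  simp [List.getD_eq_getElem?_getD, List.getElem?_append_right h]

theorem tabOK_double (k : Nat) (s : List (List Int)) (h : TabOK k s) :
    TabOK (k+1) (cdDouble s) := by
  obtain ⟨hlen, hrow, hent⟩ := h
  have hm : (2:Nat) ^ (k+1) = 2 ^ k + 2 ^ k := by ring
  unfold TabOK cdDouble
  simp only [hlen]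
  refine ⟨by simp [hm], ?_, ?_⟩
  · intro i hi
    by_cases hik : i < 2 ^ k
    · rw [getD_append_lt _ _ _ i (by simp [hik]), PySem.List.getD_map_range _ _ _ _ hik]
      rw [List.length_append, List.length_map, List.length_range, hrow i hik, hm]
    · have hi2 : i - 2 ^ k < 2 ^ k := by omega
      rw [getD_append_ge _ _ _ i (by simp; omega)]
      simp only [List.length_map, List.length_range]
      rw [PySem.List.getD_map_range _ _ _ _ hi2, List.length_append,
        List.length_map, List.length_range, List.length_map, List.length_range, hm]
  · intro i hi j hj
    by_cases hik : i < 2 ^ k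
    · rw [getD_append_lt _ _ _ i (by simp [hik]), PySem.List.getD_map_range _ _ _ _ hik]
      by_cases hjk : j < 2 ^ k
      · rw [getD_append_lt _ _ _ j (by rw [hrow i hik]; exact hjk), hent i hik j hjk]
        simp [signF, hik, hjk]
      · have hj2 : j - 2 ^ k < 2 ^ k := by omega
        rw [getD_append_ge _ _ _ j (by rw [hrow i hik]; omega), hrow i hik,
          PySem.List.getD_map_range _ _ _ _ hj2, hent (j - 2 ^ k) hj2 i hik]
        simp [signF, hik, hjk]
    · have hi2 : i - 2 ^ k < 2 ^ k := by omega
      rw [getD_append_ge _ _ _ i (by simp; omega)]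
      simp only [List.length_map, List.length_range]
      rw [PySem.List.getD_map_range _ _ _ _ hi2]
      by_cases hjk : j < 2 ^ k
      · rw [getD_append_lt _ _ _ j (by simp [hjk]),
          PySem.List.getD_map_range _ _ _ _ hjk, hent (i - 2 ^ k) hi2 j hjk]
        simp [signF, hik, hjk]
      · have hj2 : j - 2 ^ k < 2 ^ k := by omega
        rw [getD_append_ge _ _ _ j (by simp; omega)]
        simp only [List.length_map, List.length_range]
        rw [PySem.List.getD_map_range _ _ _ _ hj2, hent (j - 2 ^ k) hj2 (i - 2 ^ k) hi2]
        simp [signF, hik, hjk]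

theorem tabOK_build (K : Nat) : ∀ (fuel k : Nat) (s : List (List Int)),
    TabOK k s → k ≤ K → K ≤ k + fuel → TabOK K (cdBuild fuel (2 ^ K) s) := by
  intro fuel
  induction fuel with
  | zero =>
    intro k s hs hk hK
    have hkK : k = K := by omega
    rw [cdBuild]
    rwa [hkK] at hs
  | succ fuel ih =>
    intro k s hs hk hK
    rcases Nat.lt_or_ge k K with h | h
    · have hlen : s.length < 2 ^ K := by
        rw [hs.1]; exact Nat.pow_lt_pow_right (by omega) h
      rw [cdBuild, if_pos hlen]
      exact ih (k+1) (cdDouble s) (tabOK_double k s hs) (by omega) (by omega)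
    · have hkK : k = K := by omega
      have hlen : ¬ s.length < 2 ^ K := by rw [hs.1, hkK]; omega
      rw [cdBuild, if_neg hlen]
      rwa [hkK] at hs

theorem cdMulAlt_eq (k : Nat) (a b : List Int)
    (ha : a.length = 2 ^ k) (_hb : b.length = 2 ^ k) :
    cd_mul_alt a b = (List.range (2 ^ k)).map (eSum k a b) := by
  have htab : TabOK k (cdBuild (2 ^ k) (2 ^ k) [[1]]) :=
    tabOK_build k (2 ^ k) 0 [[1]] tabOK_zero (Nat.zero_le k)
      (by have := Nat.lt_two_pow_self (n := k); omega)
  unfold cd_mul_alt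
  simp only [ha]
  apply List.map_congr_left
  intro r hr
  rw [List.mem_range] at hr
  have hbridge : ∀ f : Nat → Int,
      ((List.range (2 ^ k)).map f).sum = ∑ i ∈ Finset.range (2 ^ k), f i := fun _ => rfl
  rw [hbridge, eSum]
  apply Finset.sum_congr rfl
  intro i hi
  rw [Finset.mem_range] at hi
  rw [htab.2.2 i hi (i ^^^ r) (Nat.xor_lt_two_pow hi hr)]

-- ---- the two Pre_ cases ----
theorem main_pow (k : Nat) (a b : List Int)
    (ha : a.length = 2 ^ k) (hb : b.length = 2 ^ k) :
    cd_mul a b = cd_mul_alt a b := by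
  have hf : k < a.length + 1 := by rw [ha]; exact Nat.lt_succ_of_lt Nat.lt_two_pow_self
  unfold cd_mul
  rw [cdMulFuel_eq k (a.length + 1) a b ha hb hf, cdMulAlt_eq k a b ha hb]

theorem main_one (a b : List Int) (ha : a.length = 1) (_hb : 1 ≤ b.length) :
    cd_mul a b = cd_mul_alt a b := by
  obtain ⟨x, rfl⟩ := List.length_eq_one_iff.mp ha
  simp [cd_mul, cd_mul_alt, cdMulFuel, cdBuild, List.range_succ]

-- ===== VERDICT (by name: the statement is the Claim_ definition above) =====
theorem cd_mul_spec : Claim_equal_cd_mul := by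
  intro a b _ hpre
  unfold Spec_cd_mul
  rcases hpre with ⟨h1, hb⟩ | ⟨hab, hpow⟩
  · exact main_one a b h1 hb
  · exact main_pow (a.length.log2) a b hpow (hab.symm.trans hpow)
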